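-- pv_equiv track=rewrite | github.com/kiranlvs93/data-structures-and-algorithms | stacks/football_game.py | solve
-- ===== SOURCE A (Python) =====
-- def solve(A, B):
--     # For every element in A,
--     # if ele == 0, pop
--     # else add to stack
--     # return the top element
--     stack = [B]
--     for pid in A:
--         if pid != 0:
--             stack.append(pid)
--         else:
--             stack.pop()
--     return stack[-1]
-- ===== SOURCE B (Python) =====
-- def solve(A, B):
--     pending = 0
--     for x in reversed(A):
--         if x == 0:
--             pending += 1
--         elif pending > 0:
--             pending -= 1
--         else:
--             return x
--     return B
-- ===== Notes on version B (the rewrite author's own statement) =====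
-- stated objective: alternative
-- what changed: Replaces the left-to-right stack simulation with a right-to-left scan that keeps only an integer count of pending pops and early-returns the surviving top element (no stack is built).
import Mathlib
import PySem

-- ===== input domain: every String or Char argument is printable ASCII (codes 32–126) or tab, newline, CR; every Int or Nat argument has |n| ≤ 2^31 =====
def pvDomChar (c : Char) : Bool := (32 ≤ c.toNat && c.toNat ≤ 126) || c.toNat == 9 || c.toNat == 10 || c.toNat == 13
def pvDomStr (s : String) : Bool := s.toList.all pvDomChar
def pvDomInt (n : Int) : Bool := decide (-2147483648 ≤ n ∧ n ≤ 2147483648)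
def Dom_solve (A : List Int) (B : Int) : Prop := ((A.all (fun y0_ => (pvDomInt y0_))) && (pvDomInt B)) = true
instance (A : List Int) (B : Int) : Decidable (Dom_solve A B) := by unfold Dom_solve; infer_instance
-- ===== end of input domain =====

-- B replaces the stack simulation by a right-to-left scan with a pending-pop counter (alternative decomposition, same cost).

-- ===== PORT A =====
-- stack.append x → s ++ [x]; stack.pop() → s.dropLast (pop on empty raises in Python: excluded by Pre_solve);
-- stack[-1] → PySem.List.pyGet? s (-1) (none = IndexError, excluded by Pre_solve).
def solveStep (s : List Int) (pid : Int) : List Int :=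
  if pid ≠ 0 then s ++ [pid] else s.dropLast

def solve (A : List Int) (B : Int) : Int :=
  (PySem.List.pyGet? (A.foldl solveStep [B]) (-1)).getD 0

-- ===== PORT B =====
def solveAltGo : List Int → Int → Int → Int
  | [], _, B => B
  | x :: rest, pending, B =>
      if x = 0 then solveAltGo rest (pending + 1) B
      else if pending > 0 then solveAltGo rest (pending - 1) B
      else x

def solve_alt (A : List Int) (B : Int) : Int := solveAltGo A.reverse 0 B

-- ===== PRECONDITION & SPEC =====
-- Pre_solve holds exactly where the Python A returns normally: at every 0 of A the zeros seen so far
-- must not outnumber the nonzeros (else stack.pop() on the empty stack raises IndexError), and overall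
-- the zeros must not outnumber the nonzeros (else the final stack is empty and stack[-1] raises).
def Pre_solve (A : List Int) (B : Int) : Prop :=
  (∀ i ∈ List.range A.length, A.getD i 1 = 0 →
      (A.take i).countP (fun a => decide (a = 0)) ≤ (A.take i).countP (fun a => decide (a ≠ 0))) ∧
  A.countP (fun a => decide (a = 0)) ≤ A.countP (fun a => decide (a ≠ 0))
instance (A : List Int) (B : Int) : Decidable (Pre_solve A B) := by unfold Pre_solve; infer_instance

def pvWitness_solve : List Int × Int := ([1, 2, 0, 3, 0], 7)

def Spec_solve (A : List Int) (B : Int) (out : Int) : Prop := out = solve_alt A B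
instance (A : List Int) (B : Int) (out : Int) : Decidable (Spec_solve A B out) := by unfold Spec_solve; infer_instance

-- ===== CLAIM (what is proved, stated in full; the proofs are below) =====
def Claim_equal_solve : Prop := ∀ (A : List Int) (B : Int), Dom_solve A B → Pre_solve A B → Spec_solve A B (solve A B)

-- ===== LEMMAS AND PROOFS =====

def zc (A : List Int) : Nat := A.countP (fun a => decide (a = 0))
def nzc (A : List Int) : Nat := A.countP (fun a => decide (a ≠ 0))

lemma zc_append (A : List Int) (x : Int) : zc (A ++ [x]) = zc A + (if x = 0 then 1 else 0) := by
  by_cases h : x = 0 <;> simp [zc, List.countP_append, h]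
lemma nzc_append (A : List Int) (x : Int) : nzc (A ++ [x]) = nzc A + (if x = 0 then 0 else 1) := by
  by_cases h : x = 0 <;> simp [nzc, List.countP_append, h]
lemma zc_nil : zc [] = 0 := rfl
lemma nzc_nil : nzc [] = 0 := rfl

-- the "no underflow during the loop" half of Pre_solve
def NUc (A : List Int) : Prop :=
  ∀ i ∈ List.range A.length, A.getD i 1 = 0 → zc (A.take i) ≤ nzc (A.take i)

lemma NUc_append_elim {A : List Int} {x : Int} (h : NUc (A ++ [x])) : NUc A := by
  intro i hi h0
  simp only [List.mem_range] at hi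
  have := h i (by simp [List.mem_range]; omega)
    (by rwa [List.getD, List.getElem?_append_left hi])
  rwa [List.take_append_of_le_length (by omega)] at this

lemma NUc_last {A : List Int} {x : Int} (h : NUc (A ++ [x])) (hx : x = 0) :
    zc A ≤ nzc A := by
  have := h A.length (by simp) (by simp [List.getD, hx])
  simpa using this

lemma len_foldl (A : List Int) (B : Int) (h : NUc A) :
    zc A ≤ nzc A + 1 ∧ (A.foldl solveStep [B]).length = 1 + nzc A - zc A := by
  induction A using List.reverseRecOn with
  | nil => simp [zc_nil, nzc_nil]
  | append_singleton A x ih =>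
    have ihA := ih (NUc_append_elim h)
    rw [List.foldl_append, List.foldl_cons, List.foldl_nil, zc_append, nzc_append]
    by_cases hx : x = 0
    · have hz := NUc_last h hx
      rw [if_pos hx, if_pos hx]
      refine ⟨by omega, ?_⟩
      simp only [solveStep, hx, ne_eq, not_true_eq_false, if_false]
      rw [List.length_dropLast, ihA.2]; omega
    · rw [if_neg hx, if_neg hx]
      refine ⟨by omega, ?_⟩
      simp only [solveStep, if_pos hx]
      rw [List.length_append, ihA.2]; simp; omega

lemma goAlt_stack (A : List Int) (B : Int) (p : Nat) (h : NUc A)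
    (hp : zc A + p ≤ nzc A) :
    solveAltGo A.reverse (p : Int) B = ((A.foldl solveStep [B])[nzc A - zc A - p]?).getD 0 := by
  induction A using List.reverseRecOn generalizing p with
  | nil =>
    rw [zc_nil, nzc_nil] at hp ⊢
    have : p = 0 := by omega
    subst this
    simp [solveAltGo]
  | append_singleton A x ih =>
    have hA := NUc_append_elim h
    have hlen := (len_foldl A B hA).2
    have hzn1 := (len_foldl A B hA).1
    rw [List.reverse_append, List.reverse_singleton, List.singleton_append,
      List.foldl_append, List.foldl_cons, List.foldl_nil, zc_append, nzc_append]
    rw [zc_append, nzc_append] at hp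
    by_cases hx : x = 0
    · -- pop: pending increases
      have hz := NUc_last h hx
      rw [if_pos hx] at hp ⊢
      rw [if_pos hx] at hp ⊢
      have hp' : zc A + (p + 1) ≤ nzc A := by omega
      have ihh := ih hA (p := p + 1) hp'
      rw [solveAltGo, if_pos hx]
      rw [show ((p : Int) + 1) = ((p + 1 : Nat) : Int) by push_cast; ring, ihh]
      simp only [solveStep, hx, ne_eq, not_true_eq_false, if_false]
      rw [show nzc A + 0 - (zc A + 1) - p = nzc A - zc A - (p + 1) by omega]
      congr 1
      rw [List.getElem?_dropLast]
      rw [if_pos (by rw [hlen]; omega)]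
    · rw [if_neg hx] at hp ⊢
      rw [if_neg hx] at hp ⊢
      rw [solveAltGo, if_neg hx]
      simp only [solveStep, if_pos hx]
      by_cases hp0 : p = 0
      · subst hp0
        rw [if_neg (by omega)]
        by_cases hze : zc A ≤ nzc A
        · rw [show nzc A + 1 - (zc A + 0) - 0 = (A.foldl solveStep [B]).length by rw [hlen]; omega]
          simp
        · have hl0 : (A.foldl solveStep [B]).length = 0 := by rw [hlen]; omega
          rw [show nzc A + 1 - (zc A + 0) - 0 = 0 by omega]
          rw [List.length_eq_zero_iff.mp hl0]
          simp
      · rw [if_pos (by omega : (p : Int) > 0)]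
        have hp' : zc A + (p - 1) ≤ nzc A := by omega
        have ihh := ih hA (p := p - 1) hp'
        rw [show ((p : Int) - 1) = ((p - 1 : Nat) : Int) by omega, ihh]
        rw [show nzc A + 1 - (zc A + 0) - p = nzc A - zc A - (p - 1) by omega]
        rw [List.getElem?_append_left (by rw [hlen]; omega)]

-- ===== VERDICT (by name: the statement is the Claim_ definition above) =====
theorem solve_spec : Claim_equal_solve := by
  intro A B _ hpre
  obtain ⟨hnu, hzn⟩ := hpre
  have hnu' : NUc A := hnu
  have hzn' : zc A ≤ nzc A := hzn
  have hG := goAlt_stack A B 0 hnu' (by omega)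
  have hlen := (len_foldl A B hnu').2
  unfold Spec_solve solve solve_alt
  rw [show ((0 : Nat) : Int) = 0 from rfl] at hG
  rw [hG]
  rw [show nzc A - zc A - 0 = (A.foldl solveStep [B]).length - 1 by rw [hlen]; omega]
  rw [PySem.List.pyGet?]
  simp only [PySem.List.pyIdx?]
  have hlpos : 0 < (A.foldl solveStep [B]).length := by rw [hlen]; omega
  rw [if_neg (by omega), if_pos (by omega)]
  simp
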